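-- pv_equiv track=rewrite | github.com/heloint/phylomedb6 | phylo-data-services/external-sources/get_orthologs_report/get_orthologs_report/get_orthologs_report.py | get_topology_difference_count_for_seed_lineage
-- ===== SOURCE A (Python) =====
-- def get_topology_difference_count_for_seed_lineage(
--     lineages: list[list[int]], seed_lineage: list[int]
-- ) -> dict[int, int]:
--     """
--     Gets the topology node differences count of the list of lineages compared to the given seed_lineage.
--
--     @param lineages: List of lineages as list of integers.
--     @param seed_lineage: List of integers, representing the lineage of the seed to be compared of.
--     @returns Dictionary of [taxonomy id, difference count]
--     """
--     counter: dict[int, int] = {}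
--     for seed_idx, seed_node in enumerate(seed_lineage):
--         for target_idx, target_lineage in enumerate(lineages):
--             if target_lineage is None:
--                 raise ValueError(
--                     f"The given lineage on index: {target_idx} has value None"
--                 )
--
--             target_taxid: int = target_lineage[-1]
--             counter.setdefault(target_taxid, 0)
--             try:
--                 target_node: int = target_lineage[seed_idx]
--             except IndexError:
--                 counter[target_taxid] += 1
--                 continue
--
--             if target_node != seed_node:
--                 counter[target_taxid] += 1
--     counter[seed_lineage[-1]] = 1
--     return counter
-- ===== SOURCE B (Python) =====
-- def get_topology_difference_count_for_seed_lineage(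
--     lineages: list[list[int]], seed_lineage: list[int]
-- ) -> dict[int, int]:
--     """
--     Gets the topology node differences count of the list of lineages compared to the given seed_lineage.
--     Two staged passes: first map every lineage to a (taxid, diff) pair, where diff is the
--     seed length minus the number of equal aligned pairs (zip truncates, and positions the
--     lineage lacks can never match, so they count as differences automatically); then
--     aggregate the pairs into the counter.
--     """
--     n = len(seed_lineage)
--     per_lineage = [
--         (lineage[-1], n - sum(a == b for a, b in zip(lineage, seed_lineage)))
--         for lineage in lineages
--     ]
--     counter: dict[int, int] = {}
--     for taxid, diff in per_lineage:
--         counter[taxid] = counter.get(taxid, 0) + diff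
--     counter[seed_lineage[-1]] = 1
--     return counter
-- ===== Notes on version B (the rewrite author's own statement) =====
-- stated objective: faster
-- what changed: B drops A's per-position mismatch counting (seed-position-outer nested loops with setdefault, try/except and one dict increment per position) and instead computes each lineage's difference count arithmetically as len(seed) minus the number of equal aligned pairs under zip, in a map pass producing (taxid, diff) pairs followed by a separate aggregation pass.
-- outside the precondition, e.g. on get_topology_difference_count_for_seed_lineage([[1, 2]], []): A raises IndexError, B raises IndexError; on get_topology_difference_count_for_seed_lineage([[]], [5]): A raises IndexError, B raises IndexError
import Mathlib
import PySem

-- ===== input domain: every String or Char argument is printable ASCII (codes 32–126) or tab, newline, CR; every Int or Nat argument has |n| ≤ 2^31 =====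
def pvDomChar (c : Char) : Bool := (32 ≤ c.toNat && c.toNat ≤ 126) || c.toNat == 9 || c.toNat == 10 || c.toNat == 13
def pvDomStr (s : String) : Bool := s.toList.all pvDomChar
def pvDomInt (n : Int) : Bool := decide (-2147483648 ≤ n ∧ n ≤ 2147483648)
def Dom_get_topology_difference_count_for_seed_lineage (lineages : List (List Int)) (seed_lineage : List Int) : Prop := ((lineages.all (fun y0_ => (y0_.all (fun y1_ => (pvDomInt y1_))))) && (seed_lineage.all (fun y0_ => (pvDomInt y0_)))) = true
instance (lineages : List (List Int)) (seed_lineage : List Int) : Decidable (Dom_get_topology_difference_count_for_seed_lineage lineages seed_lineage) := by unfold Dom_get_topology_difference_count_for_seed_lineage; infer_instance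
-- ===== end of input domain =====

-- B replaces A's per-position mismatch counting (nested loops, setdefault, try/except)
-- by two staged passes: a map pass turning each lineage into a (taxid, diff) pair with
-- diff = seed length minus the number of equal aligned pairs under zip, then an
-- aggregation pass over those pairs (objective: faster by constant factor, measured).

-- ===== PORT A =====
def get_topology_difference_count_for_seed_lineage (lineages : List (List Int)) (seed_lineage : List Int) : List (Int × Int) :=
  let counter : PySem.Dict Int Int :=
    (PySem.List.enumerate seed_lineage 0).foldl (fun counter p =>
      lineages.foldl (fun counter target_lineage =>
        -- target_lineage[-1]; none = IndexError on an empty lineage, excluded by Pre_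
        let target_taxid : Int := (PySem.List.pyGet? target_lineage (-1)).getD 0
        let counter := counter.setdefault target_taxid 0
        match PySem.List.pyGet? target_lineage p.1 with
        | none => counter.modify target_taxid 0 (· + 1)       -- except IndexError: counter[taxid] += 1
        | some target_node =>
            if target_node ≠ p.2 then counter.modify target_taxid 0 (· + 1) else counter) counter)
      PySem.Dict.empty
  -- seed_lineage[-1]; none = IndexError on an empty seed, excluded by Pre_
  (counter.insert ((PySem.List.pyGet? seed_lineage (-1)).getD 0) 1).items

-- ===== PORT B =====
def get_topology_difference_count_for_seed_lineage_alt (lineages : List (List Int)) (seed_lineage : List Int) : List (Int × Int) :=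
  let n : Int := seed_lineage.length
  -- stage 1: map each lineage to (taxid, diff); lineage[-1] none = IndexError, excluded by Pre_
  let per_lineage : List (Int × Int) := lineages.map (fun lineage =>
    ((PySem.List.pyGet? lineage (-1)).getD 0,
     n - (((lineage.zip seed_lineage).countP (fun q => q.1 == q.2) : Nat) : Int)))
  -- stage 2: aggregate the pairs
  let counter : PySem.Dict Int Int :=
    per_lineage.foldl (fun c q => c.insert q.1 (c.getD q.1 0 + q.2)) PySem.Dict.empty
  (counter.insert ((PySem.List.pyGet? seed_lineage (-1)).getD 0) 1).items

-- ===== PRECONDITION & SPEC =====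
-- Pre_ excludes exactly the inputs where the Python A raises IndexError: an empty
-- seed_lineage (seed_lineage[-1]) and, when seed_lineage is non-empty, any empty lineage
-- (target_lineage[-1]).
def Pre_get_topology_difference_count_for_seed_lineage (lineages : List (List Int)) (seed_lineage : List Int) : Prop :=
  seed_lineage ≠ [] ∧ ∀ l ∈ lineages, l ≠ []
instance (lineages : List (List Int)) (seed_lineage : List Int) : Decidable (Pre_get_topology_difference_count_for_seed_lineage lineages seed_lineage) := by unfold Pre_get_topology_difference_count_for_seed_lineage; infer_instance
def pvWitness_get_topology_difference_count_for_seed_lineage : List (List Int) × List Int := ([[1, 2], [1, 3], [4, 3]], [1, 2, 5])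

def Spec_get_topology_difference_count_for_seed_lineage (lineages : List (List Int)) (seed_lineage : List Int) (out : List (Int × Int)) : Prop := out = get_topology_difference_count_for_seed_lineage_alt lineages seed_lineage
instance (lineages : List (List Int)) (seed_lineage : List Int) (out : List (Int × Int)) : Decidable (Spec_get_topology_difference_count_for_seed_lineage lineages seed_lineage out) := by unfold Spec_get_topology_difference_count_for_seed_lineage; infer_instance

-- ===== CLAIM (what is proved, stated in full; the proofs are below) =====
def Claim_equal_get_topology_difference_count_for_seed_lineage : Prop := ∀ (lineages : List (List Int)) (seed_lineage : List Int), Dom_get_topology_difference_count_for_seed_lineage lineages seed_lineage → Pre_get_topology_difference_count_for_seed_lineage lineages seed_lineage → Spec_get_topology_difference_count_for_seed_lineage lineages seed_lineage (get_topology_difference_count_for_seed_lineage lineages seed_lineage)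

-- ===== LEMMAS AND PROOFS =====

-- taxid key of a lineage (the same expression in both ports)
def pvTau (tl : List Int) : Int := (PySem.List.pyGet? tl (-1)).getD 0

-- A's increment for one (seed index, seed node) pair on one lineage
def pvDelta (p : Int × Int) (tl : List Int) : Int :=
  match PySem.List.pyGet? tl p.1 with
  | none => 1
  | some v => if v ≠ p.2 then 1 else 0

-- one A-style update written as a plain insert
def pvUpd (p : Int × Int) (c : PySem.Dict Int Int) (tl : List Int) : PySem.Dict Int Int :=
  c.insert (pvTau tl) (c.getD (pvTau tl) 0 + pvDelta p tl)

-- B-style accumulation of a per-lineage count f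
def pvAccum (f : List Int → Int) (L : List (List Int)) (c : PySem.Dict Int Int) : PySem.Dict Int Int :=
  L.foldl (fun c tl => c.insert (pvTau tl) (c.getD (pvTau tl) 0 + f tl)) c

def pvSum (P : List (Int × Int)) (tl : List Int) : Int := (P.map (fun p => pvDelta p tl)).sum

-- re-inserting a key's own value is the identity (keys unique)
theorem pv_insert_getD_self (c : PySem.Dict Int Int) (k : Int)
    (h : c.contains k = true) (hn : c.keys.Nodup) : c.insert k (c.getD k 0) = c := by
  apply PySem.Dict.ext
  rw [PySem.Dict.items_insert_of_contains _ _ h]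
  conv_rhs => rw [← List.map_id c.items]
  apply List.map_eq_map_iff.mpr
  intro p hp
  by_cases hk : p.1 = k
  · have hm : (k, p.2) ∈ c.items := by rw [← hk]; exact hp
    have hg := PySem.Dict.getD_of_mem_items (d := c) (d0 := (0:Int)) hm hn
    rw [hg, ← hk]; simp
  · simp [hk]

-- two inserts at distinct keys commute when the first key is already present
theorem pv_insert_comm_of_contains (c : PySem.Dict Int Int) {k k' : Int} (v v' : Int)
    (h : c.contains k = true) (hne : k ≠ k') :
    (c.insert k' v').insert k v = (c.insert k v).insert k' v' := by
  have h1 : (c.insert k' v').contains k = true := by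
    rw [PySem.Dict.contains_insert]; simp [h]
  by_cases hc' : c.contains k' = true
  · have h2 : (c.insert k v).contains k' = true := by
      rw [PySem.Dict.contains_insert]; simp [hc']
    apply PySem.Dict.ext
    rw [PySem.Dict.items_insert_of_contains _ _ h1, PySem.Dict.items_insert_of_contains _ _ hc',
        PySem.Dict.items_insert_of_contains _ _ h2, PySem.Dict.items_insert_of_contains _ _ h]
    simp only [List.map_map]
    apply List.map_eq_map_iff.mpr
    intro p _
    by_cases hpk : p.1 = k <;> by_cases hpk' : p.1 = k' <;>
      simp_all [Function.comp, Ne.symm hne]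
  · have hc'f : c.contains k' = false := by simpa using hc'
    have h2 : (c.insert k v).contains k' = false := by
      rw [PySem.Dict.contains_insert]; simp [hc'f, Ne.symm hne]
    apply PySem.Dict.ext
    rw [PySem.Dict.items_insert_of_contains _ _ h1,
        PySem.Dict.items_insert_of_not_contains _ _ hc'f,
        PySem.Dict.items_insert_of_not_contains _ _ h2,
        PySem.Dict.items_insert_of_contains _ _ h]
    simp [Ne.symm hne]

-- adding a to a key already present in c commutes with a whole accumulation pass
theorem pv_comm (L : List (List Int)) (f : List Int → Int) :
    ∀ (c : PySem.Dict Int Int) (k a : Int), c.contains k = true →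
    (pvAccum f L c).insert k ((pvAccum f L c).getD k 0 + a) =
      pvAccum f L (c.insert k (c.getD k 0 + a)) := by
  induction L with
  | nil => intro c k a _; rfl
  | cons u L ih =>
    intro c k a hk
    have hcu : (c.insert (pvTau u) (c.getD (pvTau u) 0 + f u)).contains k = true := by
      rw [PySem.Dict.contains_insert]; simp [hk]
    have step : pvAccum f (u :: L) c = pvAccum f L (c.insert (pvTau u) (c.getD (pvTau u) 0 + f u)) := rfl
    rw [step, ih _ k a hcu]
    show pvAccum f L _ = pvAccum f L _
    beta_reduce
    congr 1
    by_cases hke : k = pvTau u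
    · subst hke
      rw [PySem.Dict.insert_insert_self, PySem.Dict.getD_insert_self,
          PySem.Dict.insert_insert_self, PySem.Dict.getD_insert_self]
      congr 1; ring
    · rw [PySem.Dict.getD_insert_of_ne _ _ _ hke,
          PySem.Dict.getD_insert_of_ne _ _ _ (Ne.symm hke)]
      exact pv_insert_comm_of_contains c _ _ hk hke

-- one extra A-pass over L fuses into the accumulated per-lineage counts
theorem pv_fuse (q : Int × Int) (f : List Int → Int) :
    ∀ (L : List (List Int)) (c : PySem.Dict Int Int),
    L.foldl (pvUpd q) (pvAccum f L c) = pvAccum (fun tl => f tl + pvDelta q tl) L c := by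
  intro L
  induction L with
  | nil => intro c; rfl
  | cons t L ih =>
    intro c
    have h1 : pvAccum f (t :: L) c = pvAccum f L (c.insert (pvTau t) (c.getD (pvTau t) 0 + f t)) := rfl
    have hct : (c.insert (pvTau t) (c.getD (pvTau t) 0 + f t)).contains (pvTau t) = true :=
      PySem.Dict.contains_insert_self _ _ _
    calc (t :: L).foldl (pvUpd q) (pvAccum f (t :: L) c)
        = L.foldl (pvUpd q) (pvUpd q (pvAccum f L (c.insert (pvTau t) (c.getD (pvTau t) 0 + f t))) t) := by rw [h1]; rfl
      _ = L.foldl (pvUpd q) (pvAccum f L ((c.insert (pvTau t) (c.getD (pvTau t) 0 + f t)).insert (pvTau t)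
            ((c.insert (pvTau t) (c.getD (pvTau t) 0 + f t)).getD (pvTau t) 0 + pvDelta q t))) := by
            rw [pvUpd, pv_comm L f _ _ _ hct]
      _ = pvAccum (fun tl => f tl + pvDelta q tl) L ((c.insert (pvTau t) (c.getD (pvTau t) 0 + f t)).insert (pvTau t)
            ((c.insert (pvTau t) (c.getD (pvTau t) 0 + f t)).getD (pvTau t) 0 + pvDelta q t)) := ih _
      _ = pvAccum (fun tl => f tl + pvDelta q tl) (t :: L) c := by
            show pvAccum _ L _ = pvAccum _ L _
            congr 1
            rw [PySem.Dict.insert_insert_self, PySem.Dict.getD_insert_self]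
            congr 1; ring

-- main interchange: A's pair-outer double loop equals B's lineage-outer accumulation
theorem pv_main (P : List (Int × Int)) :
    ∀ (f : List Int → Int) (L : List (List Int)) (c : PySem.Dict Int Int),
    P.foldl (fun c p => L.foldl (pvUpd p) c) (pvAccum f L c) =
      pvAccum (fun tl => f tl + pvSum P tl) L c := by
  induction P with
  | nil =>
    intro f L c
    simp only [List.foldl_nil]
    congr 1
    funext tl
    simp [pvSum]
  | cons q P ih =>
    intro f L c
    simp only [List.foldl_cons]
    rw [pv_fuse q f L c, ih _ L c]
    congr 1
    funext tl
    simp [pvSum]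
    ring

-- A's literal inner body is pvUpd on a nodup-keyed dict
theorem pv_step (p : Int × Int) (c : PySem.Dict Int Int) (tl : List Int) (hn : c.keys.Nodup) :
    (let target_taxid : Int := (PySem.List.pyGet? tl (-1)).getD 0
     let c1 := c.setdefault target_taxid 0
     match PySem.List.pyGet? tl p.1 with
     | none => c1.modify target_taxid 0 (· + 1)
     | some target_node =>
         if target_node ≠ p.2 then c1.modify target_taxid 0 (· + 1) else c1) = pvUpd p c tl := by
  have htau : (PySem.List.pyGet? tl (-1)).getD 0 = pvTau tl := rfl
  by_cases hc : c.contains (pvTau tl) = true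
  · simp only [htau, PySem.Dict.setdefault_of_contains _ _ hc]
    rcases hg : PySem.List.pyGet? tl p.1 with _ | v
    · simp only [pvUpd, pvDelta, hg, PySem.Dict.modify]
    · by_cases hv : v ≠ p.2
      · simp only [hg, pvUpd, pvDelta, PySem.Dict.modify]
        simp [hv]
      · rw [not_ne_iff] at hv
        simp only [hg, pvUpd, pvDelta, PySem.Dict.modify]
        simp only [hv, ne_eq, not_true_eq_false, if_false, add_zero]
        exact (pv_insert_getD_self c _ hc hn).symm
  · have hcf : c.contains (pvTau tl) = false := by simpa using hc
    simp only [htau, PySem.Dict.setdefault_of_not_contains _ _ hcf]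
    have hg0 : c.getD (pvTau tl) 0 = 0 := PySem.Dict.getD_of_not_contains _ _ hcf
    rcases hg : PySem.List.pyGet? tl p.1 with _ | v
    · simp only [pvUpd, pvDelta, hg, PySem.Dict.modify, PySem.Dict.getD_insert_self,
        PySem.Dict.insert_insert_self, hg0]
    · by_cases hv : v ≠ p.2
      · simp only [hg, pvUpd, pvDelta, PySem.Dict.modify, PySem.Dict.getD_insert_self,
          PySem.Dict.insert_insert_self, hg0]
        simp [hv]
      · rw [not_ne_iff] at hv
        simp only [hg, pvUpd, pvDelta, hg0]
        simp [hv]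

theorem pv_nodup_upd (p : Int × Int) (c : PySem.Dict Int Int) (tl : List Int)
    (hn : c.keys.Nodup) : (pvUpd p c tl).keys.Nodup :=
  PySem.Dict.nodup_keys_insert _ _ _ hn

theorem pv_nodup_pass (p : Int × Int) (L : List (List Int)) (c : PySem.Dict Int Int)
    (hn : c.keys.Nodup) : (L.foldl (pvUpd p) c).keys.Nodup := by
  unfold pvUpd
  exact PySem.Dict.nodup_keys_foldl_insert_key L pvTau
    (fun d tl => d.getD (pvTau tl) 0 + pvDelta p tl) c hn

-- A's literal inner loop equals the pvUpd fold
theorem pv_inner_eq (p : Int × Int) :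
    ∀ (L : List (List Int)) (c : PySem.Dict Int Int), c.keys.Nodup →
    L.foldl (fun counter target_lineage =>
        let target_taxid : Int := (PySem.List.pyGet? target_lineage (-1)).getD 0
        let counter := counter.setdefault target_taxid 0
        match PySem.List.pyGet? target_lineage p.1 with
        | none => counter.modify target_taxid 0 (· + 1)
        | some target_node =>
            if target_node ≠ p.2 then counter.modify target_taxid 0 (· + 1) else counter) c
      = L.foldl (pvUpd p) c := by
  intro L
  induction L with
  | nil => intro c _; rfl
  | cons t L ih =>
    intro c hn
    simp only [List.foldl_cons]
    rw [pv_step p c t hn]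
    exact ih _ (pv_nodup_upd p c t hn)

-- A's literal double loop equals the pvUpd double fold
theorem pv_outer_eq (L : List (List Int)) :
    ∀ (P : List (Int × Int)) (c : PySem.Dict Int Int), c.keys.Nodup →
    P.foldl (fun counter p =>
        L.foldl (fun counter target_lineage =>
          let target_taxid : Int := (PySem.List.pyGet? target_lineage (-1)).getD 0
          let counter := counter.setdefault target_taxid 0
          match PySem.List.pyGet? target_lineage p.1 with
          | none => counter.modify target_taxid 0 (· + 1)
          | some target_node =>
              if target_node ≠ p.2 then counter.modify target_taxid 0 (· + 1) else counter) counter) c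
      = P.foldl (fun c p => L.foldl (pvUpd p) c) c := by
  intro P
  induction P with
  | nil => intro c _; rfl
  | cons q P ih =>
    intro c hn
    simp only [List.foldl_cons]
    rw [pv_inner_eq q L c hn]
    exact ih _ (pv_nodup_pass q L c hn)

-- shifting the index by one past a cons cell leaves pvDelta unchanged (nonnegative indices)
theorem pv_delta_shift (t : Int) (tl : List Int) (st x : Int) (hst : 0 ≤ st) :
    pvDelta (st + 1, x) (t :: tl) = pvDelta (st, x) tl := by
  have h1 : PySem.List.pyGet? (t :: tl) (st + 1) = PySem.List.pyGet? tl st := by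
    rw [PySem.List.pyGet?_of_nonneg _ (by omega), PySem.List.pyGet?_of_nonneg _ hst]
    have : (st + 1).toNat = st.toNat + 1 := by omega
    rw [this, List.getElem?_cons_succ]
  simp only [pvDelta, h1]

-- with an empty lineage every seed position is a difference
theorem pv_sum_nil : ∀ (s : List Int) (st : Int),
    pvSum (PySem.List.enumerate s st) [] = (s.length : Int) := by
  intro s
  induction s with
  | nil => intro st; simp [pvSum, PySem.List.enumerate_nil]
  | cons x s ih =>
    intro st
    rw [PySem.List.enumerate_cons]
    simp only [pvSum, List.map_cons, List.sum_cons] at *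
    rw [ih (st + 1)]
    have : pvDelta (st, x) [] = 1 := by simp [pvDelta, PySem.List.pyGet?]
    rw [this]
    simp
    ring

-- shifting the whole enumeration by one past a cons cell
theorem pv_sum_shift (t : Int) (tl : List Int) :
    ∀ (s : List Int) (st : Int), 0 ≤ st →
    pvSum (PySem.List.enumerate s (st + 1)) (t :: tl) = pvSum (PySem.List.enumerate s st) tl := by
  intro s
  induction s with
  | nil => intro st _; simp [pvSum, PySem.List.enumerate_nil]
  | cons x s ih =>
    intro st hst
    rw [PySem.List.enumerate_cons, PySem.List.enumerate_cons]
    simp only [pvSum, List.map_cons, List.sum_cons] at *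
    rw [pv_delta_shift t tl st x hst, ih (st + 1) (by omega)]

-- A's total per-lineage difference count equals seed length minus zip-matches (B's formula)
theorem pv_sum_eq_zip : ∀ (s tl : List Int),
    pvSum (PySem.List.enumerate s 0) tl
      = (s.length : Int) - (((tl.zip s).countP (fun q => q.1 == q.2) : Nat) : Int) := by
  intro s
  induction s with
  | nil => intro tl; simp [pvSum, PySem.List.enumerate_nil]
  | cons x s ih =>
    intro tl
    cases tl with
    | nil =>
      rw [pv_sum_nil]
      simp
    | cons t tl =>
      rw [PySem.List.enumerate_cons]
      simp only [pvSum, List.map_cons, List.sum_cons]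
      have hsum : (List.map (fun p => pvDelta p (t :: tl)) (PySem.List.enumerate s (0 + 1))).sum
          = pvSum (PySem.List.enumerate s 0) tl := pv_sum_shift t tl s 0 le_rfl
      rw [hsum, ih tl]
      have hd : pvDelta (0, x) (t :: tl) = if t = x then 0 else 1 := by
        have h0 : PySem.List.pyGet? (t :: tl) 0 = some t := by
          rw [PySem.List.pyGet?_of_nonneg _ le_rfl]; rfl
        by_cases ht : t = x <;> simp [pvDelta, ht]
      rw [hd]
      simp only [List.zip_cons_cons, List.countP_cons, List.length_cons]
      by_cases ht : t = x
      · simp only [ht, beq_self_eq_true, if_true]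
        simp
      · have : ((t, x).1 == (t, x).2) = false := by simpa using ht
        simp only [this]
        simp [ht]
        ring

-- ===== VERDICT (by name: the statement is the Claim_ definition above) =====
theorem get_topology_difference_count_for_seed_lineage_spec : Claim_equal_get_topology_difference_count_for_seed_lineage := by
  intro lineages seed_lineage _hdom hpre
  obtain ⟨hs, -⟩ := hpre
  obtain ⟨s0, rest, rfl⟩ : ∃ s0 rest, seed_lineage = s0 :: rest := by
    cases seed_lineage with
    | nil => exact absurd rfl hs
    | cons a b => exact ⟨a, b, rfl⟩
  unfold Spec_get_topology_difference_count_for_seed_lineage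
  unfold get_topology_difference_count_for_seed_lineage
  unfold get_topology_difference_count_for_seed_lineage_alt
  simp only [List.foldl_map]
  congr 1
  rw [pv_outer_eq lineages _ PySem.Dict.empty PySem.Dict.nodup_keys_empty]
  rw [PySem.List.enumerate_cons, List.foldl_cons]
  have h0 : lineages.foldl (pvUpd (0, s0)) PySem.Dict.empty
      = pvAccum (fun tl => pvDelta (0, s0) tl) lineages PySem.Dict.empty := rfl
  rw [h0, pv_main (PySem.List.enumerate rest (0 + 1)) _ lineages PySem.Dict.empty]
  congr 1
  show pvAccum _ lineages PySem.Dict.empty = pvAccum _ lineages PySem.Dict.empty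
  congr 1
  funext tl
  have h1 : pvDelta (0, s0) tl + pvSum (PySem.List.enumerate rest (0 + 1)) tl
      = pvSum (PySem.List.enumerate (s0 :: rest) 0) tl := by
    rw [PySem.List.enumerate_cons]; simp [pvSum]
  rw [h1, pv_sum_eq_zip (s0 :: rest) tl]
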